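-- pv_equiv track=rewrite | github.com/jtagaca/leetcoding2021 | exp.py | nToKGroups
-- ===== SOURCE A (Python) =====
-- def nToKGroups(n,k):
--     if n<k:
--         return 0
--     dp=[[0 for i in range(n+1)] for j in range(k+1)]
--     for i in range(1,k+1):
--         for j in range(i,n+1):
--             if i==j:
--                 dp[i][j]=1
--             else:
--                 dp[i][j]=dp[i-1][j-1]+dp[i][j-i]
--     return dp[k][n]
-- ===== SOURCE B (Python) =====
-- def nToKGroups(n, k):
--     # partitions of n into exactly k parts == partitions of n-k into parts of size at most k
--     # (subtract 1 from each of the k parts); counted by a 1-D bounded-part-size knapsack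
--     if n < k or k <= 0:
--         return 0
--     m = n - k
--     dp = [1] + [0] * m
--     for size in range(1, k + 1):
--         for t in range(size, m + 1):
--             dp[t] += dp[t - size]
--     return dp[m]
-- ===== Notes on version B (the rewrite author's own statement) =====
-- stated objective: alternative
-- what changed: Replaces A's 2-D table for the recurrence P(k,n)=P(k-1,n-1)+P(k,n-k) by a different algorithm: via the bijection 'subtract 1 from each of the k parts', it counts partitions of n-k into parts of size at most k with a 1-D bounded-part-size knapsack dp[t]+=dp[t-size]; Pre_ excludes k<0 with n>=k, where A raises IndexError (B returns 0 there).
import Mathlib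
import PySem

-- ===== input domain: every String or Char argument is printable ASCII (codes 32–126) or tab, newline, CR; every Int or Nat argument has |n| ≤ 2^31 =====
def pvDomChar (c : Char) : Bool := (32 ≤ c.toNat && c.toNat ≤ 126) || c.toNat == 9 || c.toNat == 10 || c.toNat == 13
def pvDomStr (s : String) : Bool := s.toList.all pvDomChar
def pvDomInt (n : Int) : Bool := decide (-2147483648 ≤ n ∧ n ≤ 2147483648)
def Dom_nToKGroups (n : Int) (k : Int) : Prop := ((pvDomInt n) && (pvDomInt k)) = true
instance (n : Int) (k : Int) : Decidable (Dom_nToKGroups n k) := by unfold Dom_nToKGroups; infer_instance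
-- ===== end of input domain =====

-- B counts partitions of n-k into parts of size ≤ k with a 1-D knapsack (a different algorithm
-- of the same cost); only return values are compared (neither program mutates an argument).

-- ===== PORT A =====
-- inner-loop body: the two assignments to dp[i][j]
def pvBodyA (i : Int) (dp : List (List Int)) (j : Int) : List (List Int) :=
  let row := PySem.List.pyGetD dp i []
  if i == j then
    PySem.List.pySetD dp i (PySem.List.pySetD row j 1)
  else
    PySem.List.pySetD dp i (PySem.List.pySetD row j
      (PySem.List.pyGetD (PySem.List.pyGetD dp (i - 1) []) (j - 1) 0 +
       PySem.List.pyGetD row (j - i) 0))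

-- one iteration of the outer loop: 'for j in range(i, n+1)'
def pvRowA (n : Int) (dp : List (List Int)) (i : Int) : List (List Int) :=
  (PySem.List.pyRange i (n + 1) 1).foldl (pvBodyA i) dp

def nToKGroups (n : Int) (k : Int) : Int :=
  if n < k then 0
  else
    let dp0 : List (List Int) :=
      (PySem.List.pyRange 0 (k + 1) 1).map (fun _ =>
        (PySem.List.pyRange 0 (n + 1) 1).map (fun _ => (0 : Int)))
    let dp := (PySem.List.pyRange 1 (k + 1) 1).foldl (pvRowA n) dp0
    PySem.List.pyGetD (PySem.List.pyGetD dp k []) n 0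

-- ===== PORT B =====
-- inner-loop body: 'dp[t] += dp[t - size]'
def pvStepB (s : Int) (dp : List Int) (t : Int) : List Int :=
  PySem.List.pySetD dp t (PySem.List.pyGetD dp t 0 + PySem.List.pyGetD dp (t - s) 0)

-- one iteration of the outer loop: 'for t in range(size, m+1)'
def pvSizeB (m : Int) (dp : List Int) (s : Int) : List Int :=
  (PySem.List.pyRange s (m + 1) 1).foldl (pvStepB s) dp

def nToKGroups_alt (n : Int) (k : Int) : Int :=
  if n < k || k ≤ 0 then 0
  else
    let m := n - k
    let dp0 : List Int := [1] ++ List.replicate m.toNat (0 : Int)   -- [1] + [0]*m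
    let dp := (PySem.List.pyRange 1 (k + 1) 1).foldl (pvSizeB m) dp0
    PySem.List.pyGetD dp m 0

-- ===== PRECONDITION & SPEC =====
-- Pre_ excludes exactly the inputs where A raises IndexError: k < 0 with n ≥ k
-- (the table then has k+1 ≤ 0 rows and dp[k] indexes an empty list).
def Pre_nToKGroups (n : Int) (k : Int) : Prop := n < k ∨ 0 ≤ k
instance (n : Int) (k : Int) : Decidable (Pre_nToKGroups n k) := by
  unfold Pre_nToKGroups; infer_instance

def pvWitness_nToKGroups : Int × Int := (7, 3)

def Spec_nToKGroups (n : Int) (k : Int) (out : Int) : Prop := out = nToKGroups_alt n k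
instance (n : Int) (k : Int) (out : Int) : Decidable (Spec_nToKGroups n k out) := by
  unfold Spec_nToKGroups; infer_instance

-- ===== CLAIM (what is proved, stated in full; the proofs are below) =====
def Claim_equal_nToKGroups : Prop := ∀ (n : Int) (k : Int), Dom_nToKGroups n k →
  Pre_nToKGroups n k → Spec_nToKGroups n k (nToKGroups n k)

-- ===== LEMMAS AND PROOFS =====

-- A's mathematical recursion: partitions of `total` into exactly `parts` parts
def pvP (parts total : Int) : Int :=
  if parts ≤ 0 then 0
  else if total < parts then 0
  else if parts = total then 1
  else pvP (parts - 1) (total - 1) + pvP parts (total - parts)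
termination_by total.toNat
decreasing_by all_goals omega

-- B's mathematical recursion: partitions of `u` into parts of size at most `s`
def pvQ (s u : Int) : Int :=
  if u < 0 then 0
  else if u = 0 then 1
  else if s ≤ 0 then 0
  else pvQ (s - 1) u + pvQ s (u - s)
termination_by s.toNat + u.toNat
decreasing_by all_goals omega

-- the bijection: subtract 1 from each of the p parts
theorem pvP_eq_pvQ : ∀ (fuel : Nat) (p t : Int), t.toNat ≤ fuel → 1 ≤ p → p ≤ t →
    pvP p t = pvQ p (t - p) := by
  intro fuel
  induction fuel with
  | zero => intro p t hf h1 h2; omega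
  | succ fuel ih =>
    intro p t hf h1 h2
    rw [pvP, if_neg (by omega), if_neg (by omega)]
    by_cases he : p = t
    · rw [if_pos he, pvQ, if_neg (by omega), if_pos (by omega)]
    · rw [if_neg he]
      conv_rhs => rw [pvQ]
      rw [if_neg (by omega), if_neg (by omega), if_neg (by omega)]
      have e1 : pvP (p - 1) (t - 1) = pvQ (p - 1) (t - p) := by
        by_cases hp : 1 ≤ p - 1
        · rw [ih (p - 1) (t - 1) (by omega) hp (by omega)]
          norm_num
        · have hp1 : p = 1 := by omega
          subst hp1
          rw [pvP, if_pos (by omega), pvQ, if_neg (by omega), if_neg (by omega),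
            if_pos (by omega)]
      have e2 : pvP p (t - p) = pvQ p (t - p - p) := by
        by_cases hq : p ≤ t - p
        · rw [ih p (t - p) (by omega) h1 hq]
        · rw [pvP, if_neg (by omega), if_pos (by omega), pvQ, if_pos (by omega)]
      rw [e1, e2]

-- sizes larger than the remaining total do not matter
theorem pvQ_lt (s u : Int) (h0 : 0 ≤ u) (h : u < s) : pvQ s u = pvQ (s - 1) u := by
  by_cases hu : u = 0
  · rw [hu, pvQ, if_neg (by omega), if_pos rfl, pvQ, if_neg (by omega), if_pos rfl]
  · rw [pvQ, if_neg (by omega), if_neg hu, if_neg (by omega)]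
    rw [show pvQ s (u - s) = 0 by rw [pvQ]; exact if_pos (by omega)]
    omega

-- ----- list access helpers -----
theorem pvGetD_nonneg {α : Type} (xs : List α) (i : Int) (d : α) (h : 0 ≤ i) :
    PySem.List.pyGetD xs i d = xs.getD i.toNat d := by
  obtain ⟨m, rfl⟩ : ∃ m : Nat, i = (m : Int) := ⟨i.toNat, (Int.toNat_of_nonneg h).symm⟩
  rw [PySem.List.pyGetD_natCast]; simp

theorem pvGetD_set {α : Type} (xs : List α) (a b : Nat) (v d : α) (h : a < xs.length) :
    (xs.set a v).getD b d = if b = a then v else xs.getD b d := by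
  by_cases hb : b = a
  · subst hb; simp [List.getD, h]
  · simp [List.getD, Ne.symm hb, hb]

-- ----- B side: invariant for the 1-D knapsack -----

-- dp[t], read with default 0
def pvF (dp : List Int) (t : Int) : Int := PySem.List.pyGetD dp t 0

-- during the fill of size s, entries before T hold Q(s,·), entries from T on hold Q(s-1,·)
def pvInvB (m s T : Int) (dp : List Int) : Prop :=
  dp.length = (m + 1).toNat ∧
  (∀ t : Int, 0 ≤ t → t < T → t ≤ m → pvF dp t = pvQ s t) ∧
  (∀ t : Int, 0 ≤ t → T ≤ t → t ≤ m → pvF dp t = pvQ (s - 1) t)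

theorem pvStepB_inv (m s T : Int) (dp : List Int) (h : pvInvB m s T dp)
    (h1 : 1 ≤ s) (hsT : s ≤ T) (hTm : T ≤ m) :
    pvInvB m s (T + 1) (pvStepB s dp T) := by
  obtain ⟨hlen, hlo, hhi⟩ := h
  have hTlen : T.toNat < dp.length := by omega
  have hval : pvF dp T + pvF dp (T - s) = pvQ s T := by
    have e1 : pvF dp T = pvQ (s - 1) T := hhi T (by omega) le_rfl hTm
    have e2 : pvF dp (T - s) = pvQ s (T - s) := by
      by_cases hc : T - s < T
      · exact hlo (T - s) (by omega) hc (by omega)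
      · omega
    rw [e1, e2]
    conv_rhs => rw [pvQ]
    rw [if_neg (by omega), if_neg (by omega), if_neg (by omega)]
  have hstep : ∀ t : Int, 0 ≤ t → t ≤ m →
      pvF (pvStepB s dp T) t = if t = T then pvQ s T else pvF dp t := by
    intro t h0 hm
    unfold pvStepB pvF
    rw [PySem.List.pySetD_of_nonneg _ _ (by omega), pvGetD_nonneg _ t _ h0,
      pvGetD_set _ _ _ _ _ hTlen]
    by_cases ht : t = T
    · rw [if_pos (by omega : t.toNat = T.toNat), if_pos ht, ← hval]; rfl
    · rw [if_neg (by omega : ¬ t.toNat = T.toNat), if_neg ht, pvGetD_nonneg _ t _ h0]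
  refine ⟨by unfold pvStepB; rw [PySem.List.pySetD_of_nonneg _ _ (by omega)]; simpa using hlen,
    ?_, ?_⟩
  · intro t h0 hlt hm
    rw [hstep t h0 hm]
    by_cases ht : t = T
    · rw [if_pos ht, ht]
    · rw [if_neg ht]; exact hlo t h0 (by omega) hm
  · intro t h0 hge hm
    rw [hstep t h0 hm, if_neg (by omega)]
    exact hhi t h0 (by omega) hm

theorem pvSizeB_inv (m s : Int) (h1 : 1 ≤ s) :
    ∀ (fuel : Nat) (T : Int) (dp : List Int), (m + 1 - T).toNat ≤ fuel → s ≤ T →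
    pvInvB m s T dp →
    pvInvB m s (m + 1) ((PySem.List.pyRange T (m + 1) 1).foldl (pvStepB s) dp) := by
  intro fuel
  induction fuel with
  | zero =>
    intro T dp hf hs h
    rw [PySem.List.pyRange_one_eq_nil (by omega), List.foldl_nil]
    obtain ⟨hlen, hlo, hhi⟩ := h
    exact ⟨hlen, fun t h0 _ hm => hlo t h0 (by omega) hm, fun t h0 hge hm => by omega⟩
  | succ fuel ih =>
    intro T dp hf hs h
    by_cases hT : T < m + 1
    · rw [PySem.List.pyRange_one_cons hT, List.foldl_cons]
      exact ih (T + 1) _ (by omega) (by omega) (pvStepB_inv m s T dp h h1 hs (by omega))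
    · rw [PySem.List.pyRange_one_eq_nil (by omega), List.foldl_nil]
      obtain ⟨hlen, hlo, hhi⟩ := h
      exact ⟨hlen, fun t h0 _ hm => hlo t h0 (by omega) hm, fun t h0 hge hm => by omega⟩

-- after finishing size s: every entry holds Q(s,·)
def pvDoneB (m s : Int) (dp : List Int) : Prop :=
  dp.length = (m + 1).toNat ∧ ∀ t : Int, 0 ≤ t → t ≤ m → pvF dp t = pvQ s t

theorem pvOuterB_inv (m : Int) (hm : 0 ≤ m) :
    ∀ (fuel : Nat) (s k : Int) (dp : List Int), (k + 1 - s).toNat ≤ fuel → 1 ≤ s →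
    pvDoneB m (s - 1) dp →
    pvDoneB m (max (s - 1) k) ((PySem.List.pyRange s (k + 1) 1).foldl (pvSizeB m) dp) := by
  intro fuel
  induction fuel with
  | zero =>
    intro s k dp hf h1 h
    rw [PySem.List.pyRange_one_eq_nil (by omega)]
    have : max (s - 1) k = s - 1 := by omega
    rw [this]; exact h
  | succ fuel ih =>
    intro s k dp hf h1 h
    by_cases hs : s < k + 1
    · rw [PySem.List.pyRange_one_cons hs, List.foldl_cons]
      obtain ⟨hlen, hval⟩ := h
      have hstart : pvInvB m s s dp :=
        ⟨hlen, fun t h0 hlt hm' => by rw [hval t h0 hm', pvQ_lt s t h0 hlt],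
          fun t h0 _ hm' => hval t h0 hm'⟩
      have hfill := pvSizeB_inv m s h1 (m + 1 - s).toNat s dp le_rfl le_rfl hstart
      obtain ⟨hlen', hlo', _⟩ := hfill
      have hdone : pvDoneB m s (pvSizeB m dp s) :=
        ⟨hlen', fun t h0 hm' => hlo' t h0 (by omega) hm'⟩
      have := ih (s + 1) k (pvSizeB m dp s) (by omega) (by omega)
        (by rw [show s + 1 - 1 = s by omega]; exact hdone)
      have hmax : max (s + 1 - 1) k = max (s - 1) k := by omega
      rwa [hmax] at this
    · rw [PySem.List.pyRange_one_eq_nil (by omega)]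
      have : max (s - 1) k = s - 1 := by omega
      rw [this]; exact h

theorem nToKGroups_alt_eq_pvP (n k : Int) (hk : 1 ≤ k) (hkn : k ≤ n) :
    nToKGroups_alt n k = pvP k n := by
  unfold nToKGroups_alt
  rw [if_neg (by simp; omega)]
  have hm : 0 ≤ n - k := by omega
  have hinit : pvDoneB (n - k) (1 - 1) ([1] ++ List.replicate (n - k).toNat (0 : Int)) := by
    refine ⟨by simp; omega, ?_⟩
    intro t h0 hm'
    unfold pvF
    rw [pvGetD_nonneg _ t _ h0]
    by_cases ht : t = 0
    · rw [ht]
      simp only [Int.toNat_zero, List.singleton_append, List.getD, List.getElem?_cons_zero,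
        Option.getD_some]
      rw [pvQ, if_neg (by omega), if_pos rfl]
    · have h1t : 1 ≤ t.toNat := by omega
      rw [List.getD, List.singleton_append, List.getElem?_cons,
        if_neg (by omega : ¬ t.toNat = 0), List.getElem?_replicate]
      rw [if_pos (by omega)]
      simp only [Option.getD_some]
      rw [pvQ, if_neg (by omega), if_neg (by omega), if_pos (by omega)]
  have h := pvOuterB_inv (n - k) hm (k + 1 - 1).toNat 1 k
    ([1] ++ List.replicate (n - k).toNat (0 : Int)) le_rfl le_rfl hinit
  have hmax : max (1 - 1) k = k := by omega
  rw [hmax] at h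
  obtain ⟨_, hval⟩ := h
  have hfin := hval (n - k) hm le_rfl
  unfold pvF at hfin
  show PySem.List.pyGetD ((PySem.List.pyRange 1 (k + 1) 1).foldl (pvSizeB (n - k))
    ([1] ++ List.replicate (n - k).toNat (0 : Int))) (n - k) 0 = pvP k n
  rw [hfin, pvP_eq_pvQ n.toNat k n le_rfl hk hkn]

-- ----- A side: loop invariant for the dp table -----

-- dp[i][j], read with default 0
def pvE (dp : List (List Int)) (i j : Int) : Int :=
  PySem.List.pyGetD (PySem.List.pyGetD dp i []) j 0

def pvShape (k n : Int) (dp : List (List Int)) : Prop :=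
  dp.length = (k + 1).toNat ∧ ∀ r ∈ dp, r.length = (n + 1).toNat

theorem pvE_set (dp : List (List Int)) (k n i j : Int) (v : Int)
    (hsh : pvShape k n dp) (hi0 : 0 ≤ i) (hik : i ≤ k) (hj0 : 0 ≤ j) (hjn : j ≤ n)
    (i' j' : Int) (hi' : 0 ≤ i') (hj' : 0 ≤ j') :
    pvE (PySem.List.pySetD dp i (PySem.List.pySetD (PySem.List.pyGetD dp i []) j v)) i' j'
      = if i' = i ∧ j' = j then v else pvE dp i' j' := by
  have hlen : i.toNat < dp.length := by rcases hsh with ⟨h1, _⟩; omega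
  have hrow : (PySem.List.pyGetD dp i []).length = (n + 1).toNat := by
    rw [pvGetD_nonneg _ _ _ hi0, List.getD_eq_getElem _ _ hlen]
    exact hsh.2 _ (List.getElem_mem hlen)
  have hrowN : PySem.List.pyGetD dp i [] = dp.getD i.toNat [] := pvGetD_nonneg _ _ _ hi0
  have hjlenN : j.toNat < (dp.getD i.toNat []).length := by
    rw [← hrowN]; omega
  unfold pvE
  rw [PySem.List.pySetD_of_nonneg _ _ hi0, PySem.List.pySetD_of_nonneg _ _ hj0,
      pvGetD_nonneg _ i' _ hi', pvGetD_nonneg _ j' _ hj', hrowN,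
      pvGetD_set _ _ _ _ _ hlen]
  by_cases hii : i' = i
  · simp only [hii, if_true, true_and]
    rw [pvGetD_set _ _ _ _ _ hjlenN]
    by_cases hjj : j' = j
    · rw [if_pos (by omega : j'.toNat = j.toNat), if_pos hjj]
    · rw [if_neg (by omega : ¬ j'.toNat = j.toNat), if_neg hjj,
        pvGetD_nonneg (PySem.List.pyGetD dp i []) j' _ hj', hrowN]
  · rw [if_neg (by omega : ¬ i'.toNat = i.toNat), if_neg (fun hc => hii hc.1),
      pvGetD_nonneg (PySem.List.pyGetD dp i' []) j' _ hj', pvGetD_nonneg dp i' _ hi']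

theorem pvShape_set (dp : List (List Int)) (k n i j : Int) (v : Int)
    (hsh : pvShape k n dp) (hi0 : 0 ≤ i) (hik : i ≤ k) (hj0 : 0 ≤ j) (_hjn : j ≤ n) :
    pvShape k n (PySem.List.pySetD dp i (PySem.List.pySetD (PySem.List.pyGetD dp i []) j v)) := by
  have hlen : i.toNat < dp.length := by rcases hsh with ⟨h1, _⟩; omega
  have hrow : (PySem.List.pyGetD dp i []).length = (n + 1).toNat := by
    rw [pvGetD_nonneg _ _ _ hi0, List.getD_eq_getElem _ _ hlen]
    exact hsh.2 _ (List.getElem_mem hlen)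
  rw [PySem.List.pySetD_of_nonneg _ _ hi0, PySem.List.pySetD_of_nonneg _ _ hj0]
  constructor
  · simpa using hsh.1
  · intro r hr
    rcases List.mem_or_eq_of_mem_set hr with h | h
    · exact hsh.2 r h
    · subst h; simpa using hrow

theorem pvBodyA_spec (k n i j : Int) (dp : List (List Int)) (hsh : pvShape k n dp)
    (hi : 1 ≤ i) (hik : i ≤ k) (_hkn : k ≤ n) (hij : i ≤ j) (hjn : j ≤ n)
    (Hprev : ∀ j', 0 ≤ j' → j' ≤ n → pvE dp (i - 1) j' = pvP (i - 1) j')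
    (Hrow : ∀ j', 0 ≤ j' → j' < j → pvE dp i j' = pvP i j') :
    (∀ i' j', 0 ≤ i' → 0 ≤ j' →
      pvE (pvBodyA i dp j) i' j' = if i' = i ∧ j' = j then pvP i j else pvE dp i' j') ∧
    pvShape k n (pvBodyA i dp j) := by
  unfold pvBodyA
  by_cases hij' : i = j
  · simp only [hij', BEq.rfl, if_true]
    have hv : pvP j j = 1 := by
      rw [pvP, if_neg (by omega), if_neg (by omega), if_pos rfl]
    constructor
    · intro i' j' hi' hj'
      rw [pvE_set dp k n j j 1 hsh (by omega) (by omega) (by omega) hjn i' j' hi' hj', hv]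
    · exact pvShape_set dp k n j j 1 hsh (by omega) (by omega) (by omega) hjn
  · have hlt : i < j := by omega
    simp only [beq_iff_eq, if_neg hij']
    have hv : pvE dp (i - 1) (j - 1) + pvE dp i (j - i) = pvP i j := by
      rw [Hprev (j - 1) (by omega) (by omega), Hrow (j - i) (by omega) (by omega)]
      conv_rhs => rw [pvP]
      rw [if_neg (by omega), if_neg (by omega), if_neg hij']
    constructor
    · intro i' j' hi' hj'
      rw [show (PySem.List.pyGetD (PySem.List.pyGetD dp (i - 1) []) (j - 1) 0 +
          PySem.List.pyGetD (PySem.List.pyGetD dp i []) (j - i) 0)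
          = pvE dp (i - 1) (j - 1) + pvE dp i (j - i) from rfl,
        pvE_set dp k n i j _ hsh (by omega) (by omega) (by omega) hjn i' j' hi' hj', hv]
    · exact pvShape_set dp k n i j _ hsh (by omega) (by omega) (by omega) hjn

theorem pvInner (k n i : Int) (hi : 1 ≤ i) (hik : i ≤ k) (hkn : k ≤ n) :
    ∀ (m : Nat) (j : Int) (dp : List (List Int)), (n + 1 - j).toNat ≤ m → i ≤ j →
    pvShape k n dp →
    (∀ j', 0 ≤ j' → j' ≤ n → pvE dp (i - 1) j' = pvP (i - 1) j') →
    (∀ j', 0 ≤ j' → j' < j → pvE dp i j' = pvP i j') →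
    pvShape k n ((PySem.List.pyRange j (n + 1) 1).foldl (pvBodyA i) dp) ∧
    (∀ i' j', 0 ≤ i' → i' ≠ i → 0 ≤ j' →
      pvE ((PySem.List.pyRange j (n + 1) 1).foldl (pvBodyA i) dp) i' j' = pvE dp i' j') ∧
    (∀ j', 0 ≤ j' → j' ≤ n →
      pvE ((PySem.List.pyRange j (n + 1) 1).foldl (pvBodyA i) dp) i j' = pvP i j') := by
  intro m
  induction m with
  | zero =>
    intro j dp hfuel hij hsh Hprev Hrow
    rw [PySem.List.pyRange_one_eq_nil (by omega)]
    exact ⟨hsh, fun _ _ _ _ _ => rfl, fun j' h0 hn => Hrow j' h0 (by omega)⟩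
  | succ m ih =>
    intro j dp hfuel hij hsh Hprev Hrow
    by_cases hj : j < n + 1
    · rw [PySem.List.pyRange_one_cons hj, List.foldl_cons]
      obtain ⟨hbody, hsh'⟩ := pvBodyA_spec k n i j dp hsh hi hik hkn hij (by omega) Hprev Hrow
      have Hprev' : ∀ j', 0 ≤ j' → j' ≤ n → pvE (pvBodyA i dp j) (i - 1) j' = pvP (i - 1) j' := by
        intro j' h0 hn
        rw [hbody (i - 1) j' (by omega) h0, if_neg (by omega), Hprev j' h0 hn]
      have Hrow' : ∀ j', 0 ≤ j' → j' < j + 1 → pvE (pvBodyA i dp j) i j' = pvP i j' := by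
        intro j' h0 hlt
        rw [hbody i j' (by omega) h0]
        by_cases hjj : j' = j
        · rw [if_pos ⟨rfl, hjj⟩, hjj]
        · rw [if_neg (fun hc => hjj hc.2), Hrow j' h0 (by omega)]
      obtain ⟨s1, s2, s3⟩ := ih (j + 1) (pvBodyA i dp j) (by omega) (by omega) hsh' Hprev' Hrow'
      refine ⟨s1, ?_, s3⟩
      intro i' j' h0 hne h0'
      rw [s2 i' j' h0 hne h0', hbody i' j' h0 h0', if_neg (fun hc => hne hc.1)]
    · rw [PySem.List.pyRange_one_eq_nil (by omega)]
      exact ⟨hsh, fun _ _ _ _ _ => rfl, fun j' h0 hn => Hrow j' h0 (by omega)⟩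

theorem pvOuter (k n : Int) (_hk : 0 ≤ k) (hkn : k ≤ n) :
    ∀ (m : Nat) (i : Int) (dp : List (List Int)), (k + 1 - i).toNat ≤ m → 1 ≤ i →
    pvShape k n dp →
    (∀ i' j', 0 ≤ i' → i' < i → 0 ≤ j' → j' ≤ n → pvE dp i' j' = pvP i' j') →
    (∀ i'' j', i ≤ i'' → 0 ≤ j' → pvE dp i'' j' = 0) →
    ∀ i' j', 0 ≤ i' → i' ≤ k → 0 ≤ j' → j' ≤ n →
      pvE ((PySem.List.pyRange i (k + 1) 1).foldl (pvRowA n) dp) i' j' = pvP i' j' := by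
  intro m
  induction m with
  | zero =>
    intro i dp hfuel h1 hsh Hdone Hzero i' j' h0 hkk h0' hn
    rw [PySem.List.pyRange_one_eq_nil (by omega)]
    exact Hdone i' j' h0 (by omega) h0' hn
  | succ m ih =>
    intro i dp hfuel h1 hsh Hdone Hzero
    by_cases hikk : i < k + 1
    · rw [PySem.List.pyRange_one_cons hikk, List.foldl_cons]
      have hik : i ≤ k := by omega
      obtain ⟨s1, s2, s3⟩ := pvInner k n i h1 hik hkn (n + 1 - i).toNat i dp le_rfl le_rfl hsh
        (fun j' h0 hn => Hdone (i - 1) j' (by omega) (by omega) h0 hn)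
        (by
          intro j' h0 hlt
          rw [Hzero i j' le_rfl h0, pvP, if_neg (by omega), if_pos (by omega)])
      have Hdone' : ∀ i' j', 0 ≤ i' → i' < i + 1 → 0 ≤ j' → j' ≤ n →
          pvE (pvRowA n dp i) i' j' = pvP i' j' := by
        intro i' j' h0 hlt h0' hn
        by_cases hii : i' = i
        · rw [hii]; exact s3 j' h0' hn
        · rw [show pvRowA n dp i =
            (PySem.List.pyRange i (n + 1) 1).foldl (pvBodyA i) dp from rfl,
            s2 i' j' h0 hii h0']
          exact Hdone i' j' h0 (by omega) h0' hn
      have Hzero' : ∀ i'' j', i + 1 ≤ i'' → 0 ≤ j' → pvE (pvRowA n dp i) i'' j' = 0 := by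
        intro i'' j' hge h0
        rw [show pvRowA n dp i =
          (PySem.List.pyRange i (n + 1) 1).foldl (pvBodyA i) dp from rfl,
          s2 i'' j' (by omega) (by omega) h0]
        exact Hzero i'' j' (by omega) h0
      exact ih (i + 1) (pvRowA n dp i) (by omega) (by omega) s1 Hdone' Hzero'
    · intro i' j' h0 hkk h0' hn
      rw [PySem.List.pyRange_one_eq_nil (by omega)]
      exact Hdone i' j' h0 (by omega) h0' hn

theorem nToKGroups_eq_pvP (n k : Int) (hk : 0 ≤ k) (hkn : k ≤ n) :
    nToKGroups n k = pvP k n := by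
  unfold nToKGroups
  rw [if_neg (by omega)]
  show pvE ((PySem.List.pyRange 1 (k + 1) 1).foldl (pvRowA n)
      ((PySem.List.pyRange 0 (k + 1) 1).map (fun _ =>
        (PySem.List.pyRange 0 (n + 1) 1).map (fun _ => (0 : Int))))) k n = pvP k n
  set zrow := (PySem.List.pyRange 0 (n + 1) 1).map (fun _ => (0 : Int)) with hz
  set dp0 := (PySem.List.pyRange 0 (k + 1) 1).map (fun _ => zrow) with hd
  have hzlen : zrow.length = (n + 1).toNat := by
    simp [hz, PySem.List.length_pyRange_one]
  have hsh : pvShape k n dp0 := by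
    constructor
    · simp [hd, PySem.List.length_pyRange_one]
    · intro r hr
      rcases List.mem_map.mp hr with ⟨_, _, rfl⟩
      exact hzlen
  have hzget : ∀ m : Nat, zrow.getD m 0 = 0 := by
    intro m
    rw [hz, List.getD, List.getElem?_map]
    cases (PySem.List.pyRange 0 (n + 1) 1)[m]? <;> rfl
  have hE0 : ∀ a b : Int, 0 ≤ a → 0 ≤ b → pvE dp0 a b = 0 := by
    intro a b h0 h0'
    unfold pvE
    rw [pvGetD_nonneg dp0 a _ h0, pvGetD_nonneg _ b _ h0']
    simp only [List.getD, hd, List.getElem?_map]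
    cases (PySem.List.pyRange 0 (k + 1) 1)[a.toNat]? with
    | none => simp
    | some x =>
      simp only [Option.map_some, Option.getD_some]
      simpa [List.getD] using hzget b.toNat
  exact pvOuter k n hk hkn (k + 1 - 1).toNat 1 dp0 le_rfl le_rfl hsh
    (fun i' j' h0 hlt h0' hn => by
      have hi0 : i' = 0 := by omega
      rw [hi0, hE0 0 j' le_rfl h0', pvP, if_pos le_rfl])
    (fun i'' j' hge h0 => hE0 i'' j' (by omega) h0)
    k n hk le_rfl (by omega) le_rfl

-- ===== VERDICT (by name: the statement is the Claim_ definition above) =====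
theorem nToKGroups_spec : Claim_equal_nToKGroups := by
  intro n k _ hpre
  unfold Spec_nToKGroups
  by_cases hnk : n < k
  · simp [nToKGroups, nToKGroups_alt, hnk]
  · have hk : 0 ≤ k := hpre.resolve_left hnk
    have hkn : k ≤ n := le_of_not_gt hnk
    show nToKGroups n k = nToKGroups_alt n k
    by_cases hk0 : k ≤ 0
    · rw [nToKGroups_eq_pvP n k hk hkn, pvP, if_pos hk0]
      simp [nToKGroups_alt, hk0]
    · rw [nToKGroups_eq_pvP n k hk hkn, nToKGroups_alt_eq_pvP n k (by omega) hkn]
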